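-- pv_equiv track=rewrite | github.com/majdbenchobba/binance-futures-bot | trading.py | has_expected_protection_orders
-- ===== SOURCE A (Python) =====
-- PROTECTION_ORDER_TYPES = {"STOP_MARKET", "TAKE_PROFIT_MARKET"}
--
-- def _is_true(value) -> bool:
--     return str(value).lower() == "true"
--
-- def get_order_type(order):
--     return (order.get("orderType") or order.get("type") or order.get("origType") or "").upper()
--
-- def is_protection_order(order):
--     order_type = get_order_type(order)
--     return order_type in PROTECTION_ORDER_TYPES and (
--         _is_true(order.get("closePosition"))
--         or _is_true(order.get("reduceOnly"))
--         or str(order.get("clientAlgoId") or order.get("clientOrderId") or "").startswith("sma_")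
--     )
--
-- def has_expected_protection_orders(open_orders, exit_side):
--     active_pairs = {
--         (get_order_type(order), (order.get("side") or "").upper())
--         for order in open_orders
--         if is_protection_order(order)
--     }
--     expected_pairs = {
--         ("STOP_MARKET", exit_side.upper()),
--         ("TAKE_PROFIT_MARKET", exit_side.upper()),
--     }
--     return expected_pairs.issubset(active_pairs)
-- ===== SOURCE B (Python) =====
-- def _matches(order, req_type, side):
--     """Does this order satisfy the requirement (req_type, side) as an active protection order?"""
--     order_type = (order.get("orderType") or order.get("type") or order.get("origType") or "").upper()
--     if order_type != req_type:
--         return False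
--     if (order.get("side") or "").upper() != side:
--         return False
--     return (str(order.get("closePosition")).lower() == "true"
--             or str(order.get("reduceOnly")).lower() == "true"
--             or str(order.get("clientAlgoId") or order.get("clientOrderId") or "").startswith("sma_"))
--
-- def has_expected_protection_orders(open_orders, exit_side):
--     side = exit_side.upper()
--     return all(any(_matches(order, req, side) for order in open_orders)
--                for req in ("STOP_MARKET", "TAKE_PROFIT_MARKET"))
-- ===== Notes on version B (the rewrite author's own statement) =====
-- stated objective: alternative
-- what changed: A makes one inventory pass building the set of all active protection (type, side) pairs and tests issubset; B inverts the direction: it iterates over the two required order types and, for each requirement, searches the order list for one order matching that exact type, side and active flags (requirement-driven nested search, no pair set, no protection-order classifier pass).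
import Mathlib
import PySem

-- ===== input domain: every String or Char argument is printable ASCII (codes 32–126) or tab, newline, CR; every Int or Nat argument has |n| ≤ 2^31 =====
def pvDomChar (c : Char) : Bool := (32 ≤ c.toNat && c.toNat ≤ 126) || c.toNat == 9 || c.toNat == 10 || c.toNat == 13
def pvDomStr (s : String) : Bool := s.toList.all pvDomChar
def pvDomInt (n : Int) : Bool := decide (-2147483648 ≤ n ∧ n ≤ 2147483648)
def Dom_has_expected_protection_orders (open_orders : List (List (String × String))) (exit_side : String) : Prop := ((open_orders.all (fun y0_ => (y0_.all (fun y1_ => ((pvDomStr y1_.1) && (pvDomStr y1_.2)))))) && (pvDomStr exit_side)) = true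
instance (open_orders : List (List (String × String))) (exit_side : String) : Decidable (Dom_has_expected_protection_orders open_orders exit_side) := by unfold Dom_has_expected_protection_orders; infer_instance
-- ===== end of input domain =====

-- B replaces A's inventory pass (build the set of active protection pairs, test issubset) by a
-- requirement-driven search: for each of the two required order types, scan the orders for one match.

-- ===== PORT A =====
-- Python 'x or y' on order.get(...) string values: None and "" are both falsy, so the chain
-- 'get(k1) or get(k2) or ... or ""' is modelled exactly with getD k "" and this helper.
def pyStrOr (a b : String) : String := if a = "" then b else a

def pvGetOrderType (o : List (String × String)) : String :=
  PySem.Str.upper (pyStrOr (pyStrOr (PySem.Dict.getD ⟨o⟩ "orderType" "") (PySem.Dict.getD ⟨o⟩ "type" "")) (PySem.Dict.getD ⟨o⟩ "origType" ""))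

-- _is_true(order.get(k)): str(None) = "None", whose lower() is "none" ≠ "true"; exact.
def pvIsTrueField (o : List (String × String)) (k : String) : Bool :=
  PySem.Str.lower ((PySem.Dict.get? ⟨o⟩ k).getD "None") == "true"

def pvIsProtectionOrder (o : List (String × String)) : Bool :=
  let t := pvGetOrderType o
  (t == "STOP_MARKET" || t == "TAKE_PROFIT_MARKET") &&
    (pvIsTrueField o "closePosition" || pvIsTrueField o "reduceOnly" ||
      PySem.Str.startswith (pyStrOr (PySem.Dict.getD ⟨o⟩ "clientAlgoId" "") (PySem.Dict.getD ⟨o⟩ "clientOrderId" "")) "sma_")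

def has_expected_protection_orders (open_orders : List (List (String × String))) (exit_side : String) : Bool :=
  let active : PySem.Set (String × String) :=
    PySem.Set.ofList ((open_orders.filter pvIsProtectionOrder).map
      (fun o => (pvGetOrderType o, PySem.Str.upper (PySem.Dict.getD ⟨o⟩ "side" ""))))
  let expected : PySem.Set (String × String) :=
    PySem.Set.ofList [("STOP_MARKET", PySem.Str.upper exit_side), ("TAKE_PROFIT_MARKET", PySem.Str.upper exit_side)]
  PySem.Set.issubset expected active

-- ===== PORT B =====
-- (pyStrOr models Python's falsy-'or' for B too)
def pvMatches (o : List (String × String)) (req side : String) : Bool :=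
  let t := PySem.Str.upper (pyStrOr (pyStrOr (PySem.Dict.getD ⟨o⟩ "orderType" "") (PySem.Dict.getD ⟨o⟩ "type" "")) (PySem.Dict.getD ⟨o⟩ "origType" ""))
  if t ≠ req then false
  else if PySem.Str.upper (PySem.Dict.getD ⟨o⟩ "side" "") ≠ side then false
  else
    (PySem.Str.lower ((PySem.Dict.get? ⟨o⟩ "closePosition").getD "None") == "true" ||
     PySem.Str.lower ((PySem.Dict.get? ⟨o⟩ "reduceOnly").getD "None") == "true" ||
     PySem.Str.startswith (pyStrOr (PySem.Dict.getD ⟨o⟩ "clientAlgoId" "") (PySem.Dict.getD ⟨o⟩ "clientOrderId" "")) "sma_")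

def has_expected_protection_orders_alt (open_orders : List (List (String × String))) (exit_side : String) : Bool :=
  let side := PySem.Str.upper exit_side
  (["STOP_MARKET", "TAKE_PROFIT_MARKET"] : List String).all
    (fun req => open_orders.any (fun o => pvMatches o req side))

-- ===== PRECONDITION & SPEC =====
def Spec_has_expected_protection_orders (open_orders : List (List (String × String))) (exit_side : String) (out : Bool) : Prop := out = has_expected_protection_orders_alt open_orders exit_side
instance (open_orders : List (List (String × String))) (exit_side : String) (out : Bool) : Decidable (Spec_has_expected_protection_orders open_orders exit_side out) := by unfold Spec_has_expected_protection_orders; infer_instance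

-- ===== CLAIM (what is proved, stated in full; the proofs are below) =====
def Claim_equal_has_expected_protection_orders : Prop := ∀ (open_orders : List (List (String × String))) (exit_side : String), Dom_has_expected_protection_orders open_orders exit_side → Spec_has_expected_protection_orders open_orders exit_side (has_expected_protection_orders open_orders exit_side)

-- ===== LEMMAS AND PROOFS =====

-- B's matcher, for a required type that IS a protection type, is exactly
-- "A classifies o as protection, with that type and that side".
theorem matches_iff (o : List (String × String)) (req side : String)
    (hreq : req = "STOP_MARKET" ∨ req = "TAKE_PROFIT_MARKET") :
    pvMatches o req side = true ↔
      (pvIsProtectionOrder o = true ∧ pvGetOrderType o = req ∧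
        PySem.Str.upper (PySem.Dict.getD ⟨o⟩ "side" "") = side) := by
  simp only [pvMatches, pvIsProtectionOrder, pvIsTrueField, pvGetOrderType]
  split_ifs with h1 h2
  · simp_all
  · simp_all
  · rcases hreq with rfl | rfl <;> simp_all

-- ===== VERDICT (by name: the statement is the Claim_ definition above) =====
theorem has_expected_protection_orders_spec : Claim_equal_has_expected_protection_orders := by
  intro open_orders exit_side _
  unfold Spec_has_expected_protection_orders
  unfold has_expected_protection_orders has_expected_protection_orders_alt
  dsimp only
  rw [Bool.eq_iff_iff]
  simp only [PySem.Set.issubset_iff, PySem.Set.mem_ofList, List.mem_cons, List.not_mem_nil,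
    or_false, List.all_cons, List.all_nil, Bool.and_eq_true, Bool.and_true,
    List.any_eq_true, List.mem_map, List.mem_filter]
  constructor
  · intro h
    refine ⟨?_, ?_⟩
    · obtain ⟨o, ⟨ho, hp⟩, he⟩ := h _ (Or.inl rfl)
      exact ⟨o, ho, (matches_iff o _ _ (Or.inl rfl)).2
        ⟨hp, by simpa using congrArg Prod.fst he, by simpa using congrArg Prod.snd he⟩⟩
    · obtain ⟨o, ⟨ho, hp⟩, he⟩ := h _ (Or.inr rfl)
      exact ⟨o, ho, (matches_iff o _ _ (Or.inr rfl)).2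
        ⟨hp, by simpa using congrArg Prod.fst he, by simpa using congrArg Prod.snd he⟩⟩
  · rintro ⟨⟨o1, ho1, hm1⟩, ⟨o2, ho2, hm2⟩⟩ x hx
    rcases hx with rfl | rfl
    · obtain ⟨hp, ht, hs⟩ := (matches_iff o1 _ _ (Or.inl rfl)).1 hm1
      exact ⟨o1, ⟨ho1, hp⟩, by rw [ht, hs]⟩
    · obtain ⟨hp, ht, hs⟩ := (matches_iff o2 _ _ (Or.inr rfl)).1 hm2
      exact ⟨o2, ⟨ho2, hp⟩, by rw [ht, hs]⟩
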